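-- pv_equiv track=rewrite | github.com/mashuaim15/filteral.ai | worker/agent/core.py | _dedup_by_author
-- ===== SOURCE A (Python) =====
-- from collections import defaultdict
--
-- def _dedup_by_author(items: list[dict], max_per_author: int = 2) -> list[dict]:
--     """Enforce max items per author."""
--     counts: dict[str, int] = defaultdict(int)
--     result = []
--     for item in items:
--         author = item.get("author", "").lower()
--         if counts[author] < max_per_author:
--             result.append(item)
--             counts[author] += 1
--     return result
-- ===== SOURCE B (Python) =====
-- def _dedup_by_author(items: list[dict], max_per_author: int = 2) -> list[dict]:
--     """Enforce max items per author (group, truncate each group, restore order)."""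
--     groups: dict[str, list] = {}
--     for i, item in enumerate(items):
--         groups.setdefault(item.get("author", "").lower(), []).append((i, item))
--     k = max(max_per_author, 0)
--     kept = []
--     for pairs in groups.values():
--         kept.extend(pairs[:k])
--     kept.sort(key=lambda p: p[0])
--     return [item for _, item in kept]
-- ===== Notes on version B (the rewrite author's own statement) =====
-- stated objective: alternative
-- what changed: Replaces the streaming counter-and-append pass with a group-by-author dict of (index,item) lists, per-group truncation to the first max_per_author entries, and a final sort by original index to restore input order.
import Mathlib
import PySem

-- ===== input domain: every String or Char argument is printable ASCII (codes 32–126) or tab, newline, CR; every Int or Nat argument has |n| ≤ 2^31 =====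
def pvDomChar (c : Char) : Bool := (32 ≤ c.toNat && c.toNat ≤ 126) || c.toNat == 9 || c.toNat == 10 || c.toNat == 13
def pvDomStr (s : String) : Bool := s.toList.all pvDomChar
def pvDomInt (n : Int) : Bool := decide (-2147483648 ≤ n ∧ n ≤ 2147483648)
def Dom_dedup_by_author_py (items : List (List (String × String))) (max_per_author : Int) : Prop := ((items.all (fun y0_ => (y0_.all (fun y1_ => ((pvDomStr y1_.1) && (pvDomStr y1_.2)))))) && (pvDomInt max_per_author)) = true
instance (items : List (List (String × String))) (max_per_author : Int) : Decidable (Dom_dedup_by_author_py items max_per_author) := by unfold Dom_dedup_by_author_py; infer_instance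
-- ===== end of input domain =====

-- B replaces A's streaming counter pass by group-by-author → truncate each group → re-sort by
-- original index (objective: alternative decomposition, same results).


-- helper shared by both ports: item.get("author", "").lower()
def pvAuthorKey (item : List (String × String)) : String :=
  PySem.Str.lower ((PySem.Dict.mk item).getD "author" "")

-- ===== PORT A =====
def dedup_by_author_py (items : List (List (String × String))) (max_per_author : Int) : List (List (String × String)) :=
  (items.foldl
    (fun (st : PySem.Dict String Int × List (List (String × String))) item =>
      let author := pvAuthorKey item
      -- defaultdict: the read counts[author] materializes the key with value 0
      let counts := st.1.setdefault author 0
      if counts.getD author 0 < max_per_author then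
        (counts.insert author (counts.getD author 0 + 1), st.2 ++ [item])
      else (counts, st.2))
    (PySem.Dict.empty, [])).2

-- ===== PORT B =====
def dedup_by_author_py_alt (items : List (List (String × String))) (max_per_author : Int) : List (List (String × String)) :=
  let pairs := PySem.List.enumerate items 0
  let groups := pairs.foldl
    (fun (d : PySem.Dict String (List (Int × List (String × String)))) p =>
      d.modify (pvAuthorKey p.2) [] (· ++ [p])) PySem.Dict.empty
  let k := max max_per_author 0
  let kept := groups.items.foldl (fun acc kv => acc ++ kv.2.take k.toNat) []
  (PySem.List.sorted kept (fun p => p.1)).map (·.2)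

-- ===== PRECONDITION & SPEC =====
def Spec_dedup_by_author_py (items : List (List (String × String))) (max_per_author : Int) (out : List (List (String × String))) : Prop := out = dedup_by_author_py_alt items max_per_author
instance (items : List (List (String × String))) (max_per_author : Int) (out : List (List (String × String))) : Decidable (Spec_dedup_by_author_py items max_per_author out) := by unfold Spec_dedup_by_author_py; infer_instance

-- ===== CLAIM (what is proved, stated in full; the proofs are below) =====
def Claim_equal_dedup_by_author_py : Prop := ∀ (items : List (List (String × String))) (max_per_author : Int), Dom_dedup_by_author_py items max_per_author → Spec_dedup_by_author_py items max_per_author (dedup_by_author_py items max_per_author)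

-- ===== LEMMAS AND PROOFS =====

-- reference: keep an element iff fewer than k earlier elements (counting from cnt) share its key
def pvRef {α : Type} (k : Int) (kf : α → String) (cnt : String → Nat) : List α → List α
  | [] => []
  | x :: xs => (if (cnt (kf x) : Int) < k then [x] else []) ++
      pvRef k kf (fun b => if b = kf x then cnt b + 1 else cnt b) xs

lemma pvRef_sublist {α : Type} (k : Int) (kf : α → String) (cnt : String → Nat) (l : List α) :
    (pvRef k kf cnt l).Sublist l := by
  induction l generalizing cnt with
  | nil => simp [pvRef]
  | cons x xs ih =>
    simp only [pvRef]
    split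
    · simpa using (ih _).cons₂ x
    · simpa using (ih _).cons x

lemma pvGetD_setdefault_of_ne {κ ν : Type} [BEq κ] [LawfulBEq κ] (d : PySem.Dict κ ν)
    (k : κ) (v d0 : ν) {k' : κ} (h : k' ≠ k) :
    (d.setdefault k v).getD k' d0 = d.getD k' d0 := by
  simp [PySem.Dict.getD, PySem.Dict.get?_setdefault_of_ne, h]

-- A's fold computes pvRef, under the invariant that the dict stores min(total count, k.toNat)
lemma pvA_loop (k : Int) (xs : List (List (String × String)))
    (d : PySem.Dict String Int) (acc : List (List (String × String))) (cnt : String → Nat)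
    (h : ∀ a, d.getD a 0 = ((min (cnt a) k.toNat : Nat) : Int)) :
    (xs.foldl
      (fun (st : PySem.Dict String Int × List (List (String × String))) item =>
        let author := pvAuthorKey item
        let counts := st.1.setdefault author 0
        if counts.getD author 0 < k then
          (counts.insert author (counts.getD author 0 + 1), st.2 ++ [item])
        else (counts, st.2))
      (d, acc)).2 = acc ++ pvRef k pvAuthorKey cnt xs := by
  induction xs generalizing d acc cnt with
  | nil => simp [pvRef]
  | cons x xs ih =>
    simp only [List.foldl_cons, pvRef]
    have hsd : (d.setdefault (pvAuthorKey x) 0).getD (pvAuthorKey x) 0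
        = ((min (cnt (pvAuthorKey x)) k.toNat : Nat) : Int) := by
      rw [PySem.Dict.getD_setdefault_self]; exact h (pvAuthorKey x)
    by_cases hc : ((min (cnt (pvAuthorKey x)) k.toNat : Nat) : Int) < k
    · have hcnt : (cnt (pvAuthorKey x) : Int) < k := by omega
      rw [if_pos hcnt]
      have := ih ((d.setdefault (pvAuthorKey x) 0).insert (pvAuthorKey x)
          ((d.setdefault (pvAuthorKey x) 0).getD (pvAuthorKey x) 0 + 1)) (acc ++ [x])
          (fun b => if b = pvAuthorKey x then cnt b + 1 else cnt b) ?_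
      · simp only [hsd, if_pos hc] at this ⊢
        rw [this]; simp
      · intro b
        rw [PySem.Dict.getD_insert]
        by_cases hb : b = pvAuthorKey x
        · subst hb; simp [hsd]; omega
        · simp only [if_neg hb]
          rw [pvGetD_setdefault_of_ne _ _ _ _ hb]
          simpa [hb] using h b
    · have hcnt : ¬ (cnt (pvAuthorKey x) : Int) < k := by omega
      rw [if_neg hcnt]
      have := ih (d.setdefault (pvAuthorKey x) 0) acc
          (fun b => if b = pvAuthorKey x then cnt b + 1 else cnt b) ?_
      · simp only [hsd, if_neg hc] at this ⊢
        rw [this]; simp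
      · intro b
        by_cases hb : b = pvAuthorKey x
        · subst hb; rw [PySem.Dict.getD_setdefault_self]
          have hh := h (pvAuthorKey x)
          simp [hh]; omega
        · rw [pvGetD_setdefault_of_ne _ _ _ _ hb]
          simpa [hb] using h b

-- stripping the enumeration indices commutes with pvRef
lemma pvRef_enumerate (k : Int) (cnt : String → Nat) (xs : List (List (String × String))) (s : Int) :
    (pvRef k (fun p => pvAuthorKey p.2) cnt (PySem.List.enumerate xs s)).map (·.2)
      = pvRef k pvAuthorKey cnt xs := by
  induction xs generalizing s cnt with
  | nil => simp [pvRef, PySem.List.enumerate]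
  | cons x xs ih => simp only [PySem.List.enumerate_cons, pvRef]; split <;> simp [ih]

-- membership in pvRef on a duplicate-free list: the prefix before p holds < k - cnt equal keys
lemma pvMem_pvRef {α : Type} [DecidableEq α] (k : Int) (kf : α → String) (cnt : String → Nat)
    (l : List α) (hl : l.Nodup) (p : α) :
    p ∈ pvRef k kf cnt l ↔ p ∈ l ∧
      ((cnt (kf p) : Int) + ((l.takeWhile (· ≠ p)).filter (fun x => kf x == kf p)).length < k) := by
  induction l generalizing cnt with
  | nil => simp [pvRef]
  | cons x xs ih =>
    rcases List.nodup_cons.mp hl with ⟨hx, hxs⟩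
    by_cases hp : p = x
    · subst hp
      have hnm : p ∉ pvRef k kf (fun b => if b = kf p then cnt b + 1 else cnt b) xs :=
        fun hmem => hx ((pvRef_sublist _ _ _ _).subset hmem)
      simp only [pvRef, List.mem_append, List.takeWhile_cons]
      split
      · simp [hnm]; omega
      · simp [hnm]; omega
    · have hxp : (decide (x ≠ p)) = true := decide_eq_true (fun h => hp h.symm)
      simp only [pvRef, List.mem_append, List.takeWhile_cons, hxp, if_pos, List.filter_cons]
      have hif : p ∈ (if (cnt (kf x) : Int) < k then [x] else []) ↔ False := by
        split <;> simp [hp]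
      rw [hif, false_or, ih _ hxs]
      by_cases hk : kf x == kf p
      · have hk' : kf x = kf p := by simpa using hk
        simp [hk', hp]
        intro _
        omega
      · have hk' : ¬ kf p = kf x := fun h => by simp [h] at hk
        simp [hp, hk, hk']

-- membership in take n of a filter of a duplicate-free list
lemma pvMem_take_filter {α : Type} [DecidableEq α] (q : α → Bool) (n : Nat)
    (l : List α) (hl : l.Nodup) (p : α) :
    p ∈ (l.filter q).take n ↔ p ∈ l ∧ q p = true ∧
      ((l.takeWhile (· ≠ p)).filter q).length < n := by
  induction l generalizing n with
  | nil => simp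
  | cons x xs ih =>
    rcases List.nodup_cons.mp hl with ⟨hx, hxs⟩
    by_cases hqx : q x = true
    · rw [List.filter_cons_of_pos hqx]
      cases n with
      | zero => simp
      | succ n =>
        rw [List.take_succ_cons]
        by_cases hp : p = x
        · subst hp
          simp [hqx]
        · have hxp : (decide (x ≠ p)) = true := decide_eq_true (fun h => hp h.symm)
          simp only [List.mem_cons, hp, false_or, List.takeWhile_cons, hxp, if_pos,
            List.filter_cons_of_pos hqx, List.length_cons]
          rw [ih _ hxs]
          constructor
          · rintro ⟨h1, h2, h3⟩; exact ⟨h1, h2, by omega⟩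
          · rintro ⟨h1, h2, h3⟩; exact ⟨h1, h2, by omega⟩
    · rw [List.filter_cons_of_neg (by simpa using hqx)]
      by_cases hp : p = x
      · subst hp
        have hnm : p ∉ (xs.filter q).take n :=
          fun hmem => hx (List.mem_of_mem_filter (List.mem_of_mem_take hmem))
        simp [hnm, hqx]
      · have hxp : (decide (x ≠ p)) = true := decide_eq_true (fun h => hp h.symm)
        simp only [List.mem_cons, hp, false_or, List.takeWhile_cons, hxp, if_pos,
          List.filter_cons_of_neg (by simpa using hqx)]
        exact ih _ hxs

-- A's value is pvRef
lemma pvA_eq (items : List (List (String × String))) (kk : Int) :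
    dedup_by_author_py items kk = pvRef kk pvAuthorKey (fun _ => 0) items := by
  unfold dedup_by_author_py
  rw [pvA_loop kk items PySem.Dict.empty [] (fun _ => 0)
    (fun a => by show (0 : Int) = ((min 0 kk.toNat : Nat) : Int); simp)]
  simp

-- B's value is pvRef
def pvGroups (kf : List (String × String) → String) (pairs : List (Int × List (String × String))) :
    PySem.Dict String (List (Int × List (String × String))) :=
  pairs.foldl (fun d p => d.modify (kf p.2) [] (· ++ [p])) PySem.Dict.empty

lemma pvGroups_keys (kf : List (String × String) → String) (pairs : List (Int × List (String × String))) :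
    (pvGroups kf pairs).keys = PySem.Set.ofList (pairs.map fun p => kf p.2) :=
  PySem.Dict.keys_foldl_modify_key pairs (fun p => kf p.2) []
    (fun _ p => (· ++ [p])) PySem.Dict.empty

lemma pvGroups_keys_nodup (kf : List (String × String) → String) (pairs : List (Int × List (String × String))) :
    (pvGroups kf pairs).keys.Nodup :=
  PySem.Dict.nodup_keys_foldl_modify_key pairs (fun p => kf p.2) []
    (fun _ p => (· ++ [p])) PySem.Dict.empty List.nodup_nil

lemma pvGroups_getD (kf : List (String × String) → String) (pairs : List (Int × List (String × String))) (c : String) :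
    (pvGroups kf pairs).getD c [] = pairs.filter (fun p => kf p.2 == c) := by
  have h2 : pvGroups kf pairs = (pairs.map (fun p => (kf p.2, p))).foldl
      (fun d q => PySem.Dict.modify d q.1 [] (· ++ [q.2])) PySem.Dict.empty :=
    (List.foldl_map (f := fun p : Int × List (String × String) => (kf p.2, p))
      (g := fun d q => PySem.Dict.modify d q.1 [] (· ++ [q.2]))
      (l := pairs) (init := PySem.Dict.empty)).symm
  rw [h2, PySem.Dict.getD_foldl_modify_append]
  simp [List.filter_map, List.map_map, Function.comp_def]

lemma pvKept_eq (kf : List (String × String) → String) (kk : Int) (pairs : List (Int × List (String × String)))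
    (hnodupP : pairs.Nodup) (hpw : pairs.Pairwise (fun p q => p.1 < q.1)) :
    PySem.List.sorted
      ((pvGroups kf pairs).items.foldl (fun acc kv => acc ++ kv.2.take (max kk 0).toNat) [])
      (fun p => p.1)
      = pvRef kk (fun p => kf p.2) (fun _ => 0) pairs := by
  have hkept : (pvGroups kf pairs).items.foldl (fun acc kv => acc ++ kv.2.take (max kk 0).toNat) []
      = (pvGroups kf pairs).keys.flatMap
          (fun c => (pairs.filter (fun p => kf p.2 == c)).take (max kk 0).toNat) := by
    rw [PySem.List.foldl_append_eq_flatMap,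
      PySem.Dict.items_eq_map_keys (pvGroups kf pairs) (pvGroups_keys_nodup kf pairs) [],
      List.flatMap_map]
    simp [pvGroups_getD kf]
  have hmemkept : ∀ p, p ∈ (pvGroups kf pairs).keys.flatMap
        (fun c => (pairs.filter (fun p => kf p.2 == c)).take (max kk 0).toNat)
      ↔ p ∈ pairs ∧
      ((pairs.takeWhile (· ≠ p)).filter
        (fun x => kf x.2 == kf p.2)).length < (max kk 0).toNat := by
    intro p
    rw [List.mem_flatMap]
    constructor
    · rintro ⟨c, hc, hpc⟩
      obtain ⟨hp1, hp2, hp3⟩ :=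
        (pvMem_take_filter (fun x => kf x.2 == c) (max kk 0).toNat pairs hnodupP p).1 hpc
      have hcc : kf p.2 = c := by simpa using hp2
      subst hcc; exact ⟨hp1, hp3⟩
    · rintro ⟨hp1, hp3⟩
      refine ⟨kf p.2, ?_, ?_⟩
      · rw [pvGroups_keys kf pairs]
        exact (PySem.Set.mem_ofList _ _).2 (List.mem_map_of_mem hp1)
      · exact (pvMem_take_filter (fun x => kf x.2 == kf p.2)
          (max kk 0).toNat pairs hnodupP p).2 ⟨hp1, by simp, hp3⟩
  have hnodupkept : ((pvGroups kf pairs).keys.flatMap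
      (fun c => (pairs.filter (fun p => kf p.2 == c)).take (max kk 0).toNat)).Nodup := by
    rw [List.nodup_flatMap]
    constructor
    · intro c _
      exact hnodupP.sublist ((List.take_sublist _ _).trans List.filter_sublist)
    · refine List.Pairwise.imp ?_ (pvGroups_keys_nodup kf pairs)
      intro c c' hne x hx hx'
      have e1 : (kf x.2 == c) = true :=
        (List.mem_filter.1 (List.mem_of_mem_take hx)).2
      have e2 : (kf x.2 == c') = true :=
        (List.mem_filter.1 (List.mem_of_mem_take hx')).2
      simp only [beq_iff_eq] at e1 e2
      exact hne (e1 ▸ e2)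
  have hRsub := pvRef_sublist kk (fun p : Int × List (String × String) => kf p.2)
    (fun _ => 0) pairs
  have hRnodup := hnodupP.sublist hRsub
  have hRpair : (pvRef kk (fun p : Int × List (String × String) => kf p.2)
      (fun _ => 0) pairs).Pairwise (fun p q => p.1 < q.1) :=
    List.Pairwise.sublist hRsub hpw
  have hRmem : ∀ p, p ∈ pvRef kk (fun p : Int × List (String × String) => kf p.2)
        (fun _ => 0) pairs ↔ p ∈ pairs ∧ (((0 : Nat) : Int) +
      (((pairs.takeWhile (· ≠ p)).filter
        (fun x => kf x.2 == kf p.2)).length : Int) < kk) :=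
    fun p => pvMem_pvRef kk (fun p : Int × List (String × String) => kf p.2)
      (fun _ => 0) pairs hnodupP p
  have hperm : (pvRef kk (fun p : Int × List (String × String) => kf p.2)
      (fun _ => 0) pairs).Perm
      ((pvGroups kf pairs).items.foldl (fun acc kv => acc ++ kv.2.take (max kk 0).toNat) []) := by
    rw [hkept, List.perm_ext_iff_of_nodup hRnodup hnodupkept]
    intro p
    rw [hRmem p, hmemkept p]
    constructor <;> rintro ⟨h1, h3⟩ <;> exact ⟨h1, by omega⟩
  exact PySem.List.sorted_eq_of_perm_of_pairwise_lt _ _ (fun p => p.1) hperm hRpair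

lemma pvB_eq (items : List (List (String × String))) (kk : Int) :
    dedup_by_author_py_alt items kk = pvRef kk pvAuthorKey (fun _ => 0) items := by
  have hnodupP : (PySem.List.enumerate items 0).Nodup :=
    (PySem.List.pairwise_lt_enumerate items 0).imp (fun h heq => by simp [heq] at h)
  have h := pvKept_eq pvAuthorKey kk (PySem.List.enumerate items 0) hnodupP
    (PySem.List.pairwise_lt_enumerate items 0)
  exact (congrArg (List.map (fun p : Int × List (String × String) => p.2)) h).trans
    (pvRef_enumerate kk (fun _ => 0) items 0)

-- ===== VERDICT (by name: the statement is the Claim_ definition above) =====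
theorem dedup_by_author_py_spec : Claim_equal_dedup_by_author_py := by
  intro items k _
  unfold Spec_dedup_by_author_py
  rw [pvA_eq, pvB_eq]
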